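-- pv_equiv track=rewrite | github.com/yassataiseer/competitive-programming | dmoj/max_flow.py | solve
-- ===== SOURCE A (Python) =====
-- def solve(values,scenarios_data):
--     data = []
--     prevous_index = 0
--     for indexes in scenarios_data:
--         amount = values[prevous_index:indexes+prevous_index]
--         prevous_index = indexes
--         if len(amount)>0:
--             data.append(max(amount))
--     return data
-- ===== SOURCE B (Python) =====
-- def solve(values, scenarios_data):
--     n = len(values)
--     # sparse table: table[j][i] = max of values[i : i + 2**j]
--     table = [values]
--     j = 1
--     while (1 << j) <= n:
--         prev = table[j - 1]
--         half = 1 << (j - 1)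
--         table.append([max(prev[i], prev[i + half])
--                       for i in range(n - (1 << j) + 1)])
--         j += 1
--
--     def clamp(i):
--         if i < 0:
--             i += n
--             return 0 if i < 0 else i
--         return n if i > n else i
--
--     out = []
--     prev_i = 0
--     for idx in scenarios_data:
--         lo = clamp(prev_i)
--         hi = clamp(idx + prev_i)
--         prev_i = idx
--         if lo < hi:
--             k = (hi - lo).bit_length() - 1
--             row = table[k]
--             out.append(max(row[lo], row[hi - (1 << k)]))
--     return out
-- ===== Notes on version B (the rewrite author's own statement) =====
-- stated objective: faster
-- what changed: B precomputes a sparse table of range maxima (doubling segment lengths) and answers each scenario slice with two O(1) table lookups after normalizing the Python slice bounds, instead of re-slicing and scanning values for every scenario.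
import Mathlib
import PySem

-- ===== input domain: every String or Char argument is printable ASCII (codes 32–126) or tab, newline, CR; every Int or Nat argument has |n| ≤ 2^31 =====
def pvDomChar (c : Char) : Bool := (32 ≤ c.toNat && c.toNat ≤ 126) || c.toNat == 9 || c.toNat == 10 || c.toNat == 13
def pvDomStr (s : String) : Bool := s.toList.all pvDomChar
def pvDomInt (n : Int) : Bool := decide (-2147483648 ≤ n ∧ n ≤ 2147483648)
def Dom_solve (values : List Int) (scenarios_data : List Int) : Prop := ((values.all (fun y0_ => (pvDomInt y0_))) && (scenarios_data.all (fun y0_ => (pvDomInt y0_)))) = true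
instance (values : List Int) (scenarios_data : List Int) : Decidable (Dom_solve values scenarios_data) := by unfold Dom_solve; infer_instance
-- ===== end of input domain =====

-- B replaces A's per-scenario slice-and-scan maximum with a precomputed sparse table of
-- range maxima answered by two table lookups per scenario (objective: faster, asymptotic).


-- ===== PORT A =====
def solve (values : List Int) (scenarios_data : List Int) : List Int :=
  (scenarios_data.foldl
    (fun (st : List Int × Int) indexes =>
      let amount := PySem.List.slice values (some st.2) (some (indexes + st.2))
      if PySem.List.len amount > 0 then
        match PySem.List.max? amount (fun y => y) with
        | some m => (st.1 ++ [m], indexes)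
        | none => (st.1, indexes)
      else (st.1, indexes))
    ([], 0)).1

-- ===== PORT B =====
-- the sparse-table rows for levels j, j+1, … (while (1 << j) <= n in Source B)
def pvBuildRows (n : Nat) (j : Nat) (prev : List Int) : List (List Int) :=
  if h : 2 ^ j ≤ n then
    let row := (List.range (n - 2 ^ j + 1)).map
      (fun i => max (prev.getD i 0) (prev.getD (i + 2 ^ (j - 1)) 0))
    row :: pvBuildRows n (j + 1) row
  else []
termination_by n - j
decreasing_by
  have := Nat.lt_two_pow_self (n := j)
  omega

-- Source B's local clamp(i): Python slice-bound normalization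
def pvClamp (n : Nat) (i : Int) : Int :=
  if i < 0 then (if i + n < 0 then 0 else i + n) else (if i > (n : Int) then n else i)

-- Source B's range-max query: k = (hi-lo).bit_length()-1; max(table[k][lo], table[k][hi - (1<<k)])
def pvQuery (table : List (List Int)) (lo hi : Int) : Int :=
  let k : Nat := PySem.Int.bitLength (hi - lo) - 1
  let row := PySem.List.pyGetD table (k : Int) []
  max (PySem.List.pyGetD row lo 0) (PySem.List.pyGetD row (hi - 2 ^ k) 0)

def solve_alt (values : List Int) (scenarios_data : List Int) : List Int :=
  let n := values.length
  let table := values :: pvBuildRows n 1 values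
  (scenarios_data.foldl
    (fun (st : List Int × Int) idx =>
      let lo := pvClamp n st.2
      let hi := pvClamp n (idx + st.2)
      if lo < hi then (st.1 ++ [pvQuery table lo hi], idx) else (st.1, idx))
    ([], 0)).1

-- ===== PRECONDITION & SPEC =====
def Spec_solve (values : List Int) (scenarios_data : List Int) (out : List Int) : Prop := out = solve_alt values scenarios_data
instance (values : List Int) (scenarios_data : List Int) (out : List Int) : Decidable (Spec_solve values scenarios_data out) := by unfold Spec_solve; infer_instance

-- ===== CLAIM (what is proved, stated in full; the proofs are below) =====
def Claim_equal_solve : Prop := ∀ (values : List Int) (scenarios_data : List Int), Dom_solve values scenarios_data → Spec_solve values scenarios_data (solve values scenarios_data)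

-- ===== LEMMAS AND PROOFS =====

-- max of a nonempty list, as Python's max computes it (0 for [] is never used)
def nmax : List Int → Int
  | [] => 0
  | x :: t => t.foldl max x

theorem foldl_max_eq_nmax (l : List Int) (a : Int) (h : l ≠ []) :
    l.foldl max a = max a (nmax l) := by
  induction l generalizing a with
  | nil => exact absurd rfl h
  | cons x t ih =>
    cases t with
    | nil => simp [nmax]
    | cons y u =>
      have h1 := ih (a := max a x) (by simp)
      have h2 := ih (a := x) (by simp)
      have h3 : nmax (x :: y :: u) = max x (nmax (y :: u)) := by
        simp only [nmax, List.foldl_cons]; exact h2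
      simp only [List.foldl_cons] at h1 ⊢
      rw [h1, h3, max_assoc]

theorem nmax_append (l1 l2 : List Int) (h1 : l1 ≠ []) (h2 : l2 ≠ []) :
    nmax (l1 ++ l2) = max (nmax l1) (nmax l2) := by
  cases l1 with
  | nil => exact absurd rfl h1
  | cons x t =>
    have h0 : nmax ((x :: t) ++ l2) = (t ++ l2).foldl max x := rfl
    rw [h0, List.foldl_append, foldl_max_eq_nmax l2 _ h2]
    rfl

theorem nmax_mem (l : List Int) (h : l ≠ []) : nmax l ∈ l := by
  cases l with
  | nil => exact absurd rfl h
  | cons x t =>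
    rcases PySem.List.foldl_max_mem t x with h' | h' <;> simp [nmax, h']

theorem le_nmax (l : List Int) (y : Int) (h : y ∈ l) : y ≤ nmax l := by
  cases l with
  | nil => simp at h
  | cons x t =>
    rcases List.mem_cons.1 h with rfl | h'
    · exact (PySem.List.le_foldl_max t y).1
    · exact (PySem.List.le_foldl_max t x).2 y h'

-- covering two (possibly overlapping) length-j windows gives the max of the whole list
theorem nmax_cover (l : List Int) (j : Nat) (hj : 0 < j) (hle : j ≤ l.length)
    (hcov : l.length ≤ 2 * j) :
    nmax l = max (nmax (l.take j)) (nmax (l.drop (l.length - j))) := by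
  have hne : l ≠ [] := by
    intro h; rw [h] at hle; simp at hle; omega
  have hne1 : l.take j ≠ [] := by
    rw [Ne, List.take_eq_nil_iff]
    push_neg
    exact ⟨by omega, hne⟩
  have hne2 : l.drop (l.length - j) ≠ [] := by
    rw [Ne, List.drop_eq_nil_iff]
    omega
  apply le_antisymm
  · have hm : nmax l ∈ l.take j ++ l.drop j := by
      rw [List.take_append_drop]; exact nmax_mem l hne
    rcases List.mem_append.1 hm with h' | h'
    · exact le_trans (le_nmax _ _ h') (le_max_left _ _)
    · -- l.drop j is a suffix of l.drop (l.length - j)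
      have heq : (l.drop (l.length - j)).drop (j - (l.length - j)) = l.drop j := by
        rw [List.drop_drop]; congr 1; omega
      have h'' : nmax l ∈ (l.drop (l.length - j)).drop (j - (l.length - j)) := by
        rw [heq]; exact h'
      exact le_trans (le_nmax _ _ (List.mem_of_mem_drop h'')) (le_max_right _ _)
  · apply max_le
    · exact le_nmax _ _ ((List.take_sublist j l).mem (nmax_mem _ hne1))
    · exact le_nmax _ _ ((List.drop_sublist _ l).mem (nmax_mem _ hne2))

-- what it means for `row` to be level-k of the sparse table
def RowSpec (values : List Int) (k : Nat) (row : List Int) : Prop :=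
  row.length = values.length - 2 ^ k + 1 ∧
  ∀ i, i + 2 ^ k ≤ values.length → row.getD i 0 = nmax ((values.drop i).take (2 ^ k))

theorem seg_split (values : List Int) (i a b : Nat) (h : i + (a + b) ≤ values.length) :
    (values.drop i).take (a + b) =
      (values.drop i).take a ++ (values.drop (i + a)).take b := by
  rw [← List.take_append_drop a ((values.drop i).take (a + b))]
  congr 1
  · rw [List.take_take]; congr 1; omega
  · rw [List.drop_take, List.drop_drop]
    congr 1 <;> omega

theorem rowSpec_zero (values : List Int) (h : 1 ≤ values.length) :
    RowSpec values 0 values := by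
  constructor
  · simp; omega
  · intro i hi
    have hlt : i < values.length := by simpa using hi
    have h1 : (values.drop i).take (2 ^ 0) = [values.getD i 0] := by
      rw [pow_zero, List.drop_eq_getElem_cons hlt, List.getD_eq_getElem _ _ hlt]
      rfl
    rw [h1]
    rfl

theorem rowSpec_step (values prev : List Int) (j : Nat) (hj : 1 ≤ j)
    (hn : 2 ^ j ≤ values.length) (hp : RowSpec values (j - 1) prev) :
    RowSpec values j ((List.range (values.length - 2 ^ j + 1)).map
      (fun i => max (prev.getD i 0) (prev.getD (i + 2 ^ (j - 1)) 0))) := by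
  obtain ⟨hlen, hval⟩ := hp
  have hppos : 0 < 2 ^ (j - 1) := Nat.two_pow_pos (j - 1)
  have hpow : 2 ^ (j - 1) + 2 ^ (j - 1) = 2 ^ j := by
    calc 2 ^ (j - 1) + 2 ^ (j - 1) = 2 ^ (j - 1 + 1) := by rw [pow_succ]; ring
      _ = 2 ^ j := by congr 1; omega
  constructor
  · simp
  · intro i hi
    rw [← hpow] at hi ⊢
    have hilt : i < values.length - (2 ^ (j - 1) + 2 ^ (j - 1)) + 1 := by omega
    have hget : ((List.range (values.length - (2 ^ (j - 1) + 2 ^ (j - 1)) + 1)).map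
        (fun i => max (prev.getD i 0) (prev.getD (i + 2 ^ (j - 1)) 0))).getD i 0
        = max (prev.getD i 0) (prev.getD (i + 2 ^ (j - 1)) 0) := by
      rw [List.getD, List.getElem?_eq_getElem (by simpa using hilt)]
      simp
    rw [hget]
    have hv1 : prev.getD i 0 = nmax ((values.drop i).take (2 ^ (j - 1))) :=
      hval i (by omega)
    have hv2 : prev.getD (i + 2 ^ (j - 1)) 0
        = nmax ((values.drop (i + 2 ^ (j - 1))).take (2 ^ (j - 1))) :=
      hval (i + 2 ^ (j - 1)) (by omega)
    rw [hv1, hv2]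
    rw [seg_split values i (2 ^ (j - 1)) (2 ^ (j - 1)) (by omega), nmax_append]
    · rw [Ne, List.take_eq_nil_iff]
      push_neg
      refine ⟨by omega, ?_⟩
      rw [Ne, List.drop_eq_nil_iff]
      omega
    · rw [Ne, List.take_eq_nil_iff]
      push_neg
      refine ⟨by omega, ?_⟩
      rw [Ne, List.drop_eq_nil_iff]
      omega

theorem buildRows_spec (values : List Int) :
    ∀ (m j : Nat) (prev : List Int), 1 ≤ j → RowSpec values (j - 1) prev →
      2 ^ (j + m) ≤ values.length →
      RowSpec values (j + m) ((pvBuildRows values.length j prev).getD m []) := by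
  intro m
  induction m with
  | zero =>
    intro j prev hj hp hn
    rw [pvBuildRows]
    simp only [Nat.add_zero] at hn ⊢
    rw [dif_pos hn]
    exact rowSpec_step values prev j hj hn hp
  | succ m ih =>
    intro j prev hj hp hn
    rw [pvBuildRows]
    have hjn : 2 ^ j ≤ values.length := by
      calc 2 ^ j ≤ 2 ^ (j + (m + 1)) := Nat.pow_le_pow_right (by norm_num) (by omega)
        _ ≤ values.length := hn
    rw [dif_pos hjn]
    simp only [List.getD_cons_succ]
    have := ih (j + 1)
      ((List.range (values.length - 2 ^ j + 1)).map
        (fun i => max (prev.getD i 0) (prev.getD (i + 2 ^ (j - 1)) 0)))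
      (by omega)
      (by simpa using rowSpec_step values prev j hj hjn hp)
      (by have : j + 1 + m = j + (m + 1) := by omega
          rw [this]; exact hn)
    have harith : j + 1 + m = j + (m + 1) := by omega
    rw [harith] at this
    exact this

theorem table_spec (values : List Int) (k : Nat) (hk : 2 ^ k ≤ values.length) :
    RowSpec values k ((values :: pvBuildRows values.length 1 values).getD k []) := by
  cases k with
  | zero =>
    simp only [List.getD_cons_zero]
    exact rowSpec_zero values (by simpa using hk)
  | succ m =>
    simp only [List.getD_cons_succ]
    have := buildRows_spec values m 1 values (le_refl 1)
      (by simpa using rowSpec_zero values (by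
            have : (1:Nat) ≤ 2 ^ (m + 1) := Nat.one_le_two_pow
            omega))
      (by simpa [Nat.add_comm] using hk)
    simpa [Nat.add_comm] using this

theorem query_eq (values : List Int) (lo hi : Nat) (h1 : lo < hi) (h2 : hi ≤ values.length) :
    pvQuery (values :: pvBuildRows values.length 1 values) (lo : Int) (hi : Int)
      = nmax ((values.drop lo).take (hi - lo)) := by
  have hcastL : (hi : Int) - (lo : Int) = ((hi - lo : Nat) : Int) := by omega
  have hbl1 : 1 ≤ PySem.Int.bitLength ((hi - lo : Nat) : Int) := by
    by_contra h
    have h0 : PySem.Int.bitLength ((hi - lo : Nat) : Int) = 0 := by omega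
    have h3 := PySem.Int.lt_two_pow_bitLength ((hi - lo : Nat) : Int)
    rw [h0] at h3
    simp [Int.natAbs_natCast] at h3
    omega
  set k : Nat := PySem.Int.bitLength ((hi : Int) - (lo : Int)) - 1 with hk
  have hkeq : k = PySem.Int.bitLength ((hi - lo : Nat) : Int) - 1 := by rw [hk, hcastL]
  have hklo : 2 ^ k ≤ hi - lo := by
    have h3 := PySem.Int.two_pow_bitLength_le ((hi - lo : Nat) : Int) (by simp; omega)
    rw [Int.natAbs_natCast] at h3
    rw [hkeq]
    exact h3
  have hkhi : hi - lo < 2 * 2 ^ k := by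
    have h3 := PySem.Int.lt_two_pow_bitLength ((hi - lo : Nat) : Int)
    rw [Int.natAbs_natCast] at h3
    have hbk : PySem.Int.bitLength ((hi - lo : Nat) : Int) = k + 1 := by omega
    rw [hbk, pow_succ] at h3
    omega
  have hq : pvQuery (values :: pvBuildRows values.length 1 values) (lo : Int) (hi : Int)
      = max (PySem.List.pyGetD (PySem.List.pyGetD
               (values :: pvBuildRows values.length 1 values) ((k : Nat) : Int) []) (lo : Int) 0)
            (PySem.List.pyGetD (PySem.List.pyGetD
               (values :: pvBuildRows values.length 1 values) ((k : Nat) : Int) [])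
               ((hi : Int) - 2 ^ k) 0) := rfl
  set P : Nat := 2 ^ k with hP
  have hPpos : 0 < P := by rw [hP]; exact Nat.two_pow_pos k
  have hkn : P ≤ values.length := by omega
  obtain ⟨hrl, hrv⟩ := table_spec values k (by rw [← hP]; exact hkn)
  have h2P : ((2 : Int)) ^ k = ((P : Nat) : Int) := by rw [hP]; push_cast; ring
  have hc2 : (hi : Int) - (2 : Int) ^ k = ((hi - P : Nat) : Int) := by rw [h2P]; omega
  rw [hq, hc2, PySem.List.pyGetD_natCast, PySem.List.pyGetD_natCast, PySem.List.pyGetD_natCast]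
  rw [hrv lo (by omega), hrv (hi - P) (by omega)]
  set l : List Int := (values.drop lo).take (hi - lo) with hl
  have hllen : l.length = hi - lo := by
    rw [hl]; simp; omega
  have hcov := nmax_cover l P hPpos (by omega) (by omega)
  have htake : l.take P = (values.drop lo).take P := by
    rw [hl, List.take_take]; congr 1; omega
  have hdrop : l.drop (l.length - P) = (values.drop (hi - P)).take P := by
    rw [hllen, hl, List.drop_take, List.drop_drop]
    congr 1
    · omega
    · congr 1
      omega
  rw [htake, hdrop] at hcov
  exact hcov.symm

theorem pvClamp_eq (n : Nat) (i : Int) : pvClamp n i = ((PySem.List.clampIdx n i : Nat) : Int) := by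
  unfold pvClamp PySem.List.clampIdx
  split_ifs with h1 h2 h3 <;> simp_all <;> omega

-- one loop step of A equals one loop step of B (on the appended element)
theorem step_eq (values : List Int) (prev idx : Int) (acc : List Int) :
    (let amount := PySem.List.slice values (some prev) (some (idx + prev))
     if PySem.List.len amount > 0 then
       match PySem.List.max? amount (fun y => y) with
       | some m => (acc ++ [m], idx)
       | none => (acc, idx)
     else (acc, idx))
    = (let lo := pvClamp values.length prev
       let hi := pvClamp values.length (idx + prev)
       if lo < hi then (acc ++ [pvQuery (values :: pvBuildRows values.length 1 values) lo hi], idx)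
       else (acc, idx)) := by
  set a := PySem.List.clampIdx values.length prev with ha
  set b := PySem.List.clampIdx values.length (idx + prev) with hb
  have hbn : b ≤ values.length := PySem.List.clampIdx_le _ _
  have hslice : PySem.List.slice values (some prev) (some (idx + prev))
      = (values.drop a).take (b - a) := rfl
  have hlenam : ((values.drop a).take (b - a)).length = b - a := by
    simp; omega
  rw [pvClamp_eq, pvClamp_eq, ← ha, ← hb]
  by_cases hab : a < b
  · have hpos : PySem.List.len (PySem.List.slice values (some prev) (some (idx + prev))) > 0 := by
      rw [hslice, PySem.List.len_eq, hlenam]; omega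
    have hne : (values.drop a).take (b - a) ≠ [] := by
      intro h; have := congrArg List.length h; rw [hlenam] at this; simp at this; omega
    rw [if_pos hpos, if_pos (by omega)]
    obtain ⟨x, t, hxt⟩ := List.exists_cons_of_ne_nil hne
    rw [hslice, hxt, PySem.List.max?_id_cons]
    have hq := query_eq values a b hab hbn
    rw [hq, hxt]
    simp [nmax]
  · have hnpos : ¬ PySem.List.len (PySem.List.slice values (some prev) (some (idx + prev))) > 0 := by
      rw [hslice, PySem.List.len_eq, hlenam]; omega
    rw [if_neg hnpos, if_neg (by omega)]

theorem loop_eq (values : List Int) (sc : List Int) :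
    ∀ (acc : List Int) (prev : Int),
    (sc.foldl
      (fun (st : List Int × Int) indexes =>
        let amount := PySem.List.slice values (some st.2) (some (indexes + st.2))
        if PySem.List.len amount > 0 then
          match PySem.List.max? amount (fun y => y) with
          | some m => (st.1 ++ [m], indexes)
          | none => (st.1, indexes)
        else (st.1, indexes))
      (acc, prev)).1
    = (sc.foldl
        (fun (st : List Int × Int) idx =>
          let lo := pvClamp values.length st.2
          let hi := pvClamp values.length (idx + st.2)
          if lo < hi then
            (st.1 ++ [pvQuery (values :: pvBuildRows values.length 1 values) lo hi], idx)
          else (st.1, idx))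
        (acc, prev)).1 := by
  induction sc with
  | nil => intro acc prev; rfl
  | cons x t ih =>
    intro acc prev
    simp only [List.foldl_cons]
    rw [step_eq values prev x acc]
    set st := (let lo := pvClamp values.length prev
               let hi := pvClamp values.length (x + prev)
               if lo < hi then
                 (acc ++ [pvQuery (values :: pvBuildRows values.length 1 values) lo hi], x)
               else (acc, x)) with hst
    have hsnd : st.2 = x := by
      rw [hst]; by_cases h : pvClamp values.length prev < pvClamp values.length (x + prev) <;>
        simp [h]
    have h2 : st = (st.1, x) := by
      rw [← hsnd]
    rw [h2]
    exact ih st.1 x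

-- ===== VERDICT (by name: the statement is the Claim_ definition above) =====
theorem solve_spec : Claim_equal_solve := by
  intro values scenarios_data _
  unfold Spec_solve solve solve_alt
  exact loop_eq values scenarios_data [] 0
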